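-- pv_equiv track=rewrite | github.com/yash-makwana/ipo | fp/agents/query_generator_agent.py | format_queries_by_page
-- ===== SOURCE A (Python) =====
-- from typing import Dict, List, Any, Optional
--
-- def format_queries_by_page(
--
--     queries: List[Dict[str, Any]]
-- ) -> Dict[int, List[Dict[str, Any]]]:
--     """
--     Organize queries by page number (for page-by-page output)
--
--     Args:
--         queries: List of query dictionaries
--
--     Returns:
--         Dictionary mapping page numbers to queries
--     """
--
--     by_page = {}
--
--     for query in queries:
--         page = query.get('page', 'N/A')
--
--         # Try to convert to int
--         try:
--             page_num = int(page)
--         except: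
--             page_num = 9999  # Put unparseable pages at end
--
--         if page_num not in by_page:
--             by_page[page_num] = []
--
--         by_page[page_num].append(query)
--
--     return dict(sorted(by_page.items()))
-- ===== SOURCE B (Python) =====
-- def format_queries_by_page(queries):
--     """Same result as A: distinct page numbers in sorted order, each mapped to
--     its queries in input order — computed by per-key filtering instead of dict bucketing."""
--     def page_num(query):
--         page = query.get('page', 'N/A')
--         try:
--             return int(page)
--         except:
--             return 9999
--     pages = sorted({page_num(q) for q in queries})
--     return {p: [q for q in queries if page_num(q) == p] for p in pages}
-- ===== Notes on version B (the rewrite author's own statement) =====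
-- stated objective: simpler
-- what changed: B drops the dict bucketing entirely: it computes the set of page numbers, sorts it, and builds the result with one per-page filter comprehension over the input (input order within a page preserved), instead of A's incremental dict of lists followed by sorting its items.
import Mathlib
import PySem

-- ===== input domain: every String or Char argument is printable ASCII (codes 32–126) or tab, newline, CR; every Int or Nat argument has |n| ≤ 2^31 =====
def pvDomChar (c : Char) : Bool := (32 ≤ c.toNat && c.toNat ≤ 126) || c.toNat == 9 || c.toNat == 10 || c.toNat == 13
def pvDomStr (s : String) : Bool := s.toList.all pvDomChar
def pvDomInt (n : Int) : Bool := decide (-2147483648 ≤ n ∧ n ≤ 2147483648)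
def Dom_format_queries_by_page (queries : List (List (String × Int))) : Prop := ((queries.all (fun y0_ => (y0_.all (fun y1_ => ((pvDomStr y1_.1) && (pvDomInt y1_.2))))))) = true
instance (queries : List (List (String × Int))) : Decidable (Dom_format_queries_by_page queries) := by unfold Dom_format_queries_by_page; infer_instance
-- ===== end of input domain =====

-- B replaces A's dict bucketing by "sorted distinct pages, then one filter pass per page" — objective: simpler.

-- shared helper: page = query.get('page', 'N/A'); int(page) (an int stays itself;
-- the default 'N/A' makes int() raise ValueError, caught → 9999)
def pvPage (q : List (String × Int)) : Int :=
  match q.find? (fun kv => kv.1 == "page") with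
  | some kv => kv.2
  | none => 9999

-- ===== PORT A =====
-- sorted(by_page.items()) compares (int, list) tuples; keys are distinct, so it is the sort by key
def format_queries_by_page (queries : List (List (String × Int))) : List (Int × List (List (String × Int))) :=
  let byPage := queries.foldl (fun d q =>
      let p := pvPage q
      let d := if d.contains p then d else d.insert p ([] : List (List (String × Int)))
      d.insert p (d.getD p [] ++ [q])) PySem.Dict.empty
  PySem.List.sorted byPage.items (fun kv => kv.1) false

-- ===== PORT B =====
def format_queries_by_page_alt (queries : List (List (String × Int))) : List (Int × List (List (String × Int))) :=
  let pages := PySem.List.sorted (PySem.Set.ofList (queries.map pvPage)) (fun k => k) false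
  pages.map (fun p => (p, queries.filter (fun q => pvPage q == p)))

-- ===== PRECONDITION & SPEC =====
def Spec_format_queries_by_page (queries : List (List (String × Int))) (out : List (Int × List (List (String × Int)))) : Prop := out = format_queries_by_page_alt queries
instance (queries : List (List (String × Int))) (out : List (Int × List (List (String × Int)))) : Decidable (Spec_format_queries_by_page queries out) := by unfold Spec_format_queries_by_page; infer_instance

-- ===== CLAIM (what is proved, stated in full; the proofs are below) =====
def Claim_equal_format_queries_by_page : Prop := ∀ (queries : List (List (String × Int))), Dom_format_queries_by_page queries → Spec_format_queries_by_page queries (format_queries_by_page queries)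

-- ===== LEMMAS AND PROOFS =====

-- A's loop body is exactly dict.modify: ensure key, then append
theorem pv_stepA (d : PySem.Dict Int (List (List (String × Int)))) (q : List (String × Int)) :
    (let p := pvPage q
     let d' := if d.contains p then d else d.insert p ([] : List (List (String × Int)))
     d'.insert p (d'.getD p [] ++ [q])) = d.modify (pvPage q) [] (· ++ [q]) := by
  simp only [PySem.Dict.modify]
  by_cases h : d.contains (pvPage q)
  · simp [h]
  · simp only [Bool.not_eq_true] at h
    simp [h, PySem.Dict.getD_insert_self, PySem.Dict.insert_insert_self,
      PySem.Dict.getD_of_not_contains d _ h]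

theorem format_queries_by_page_spec : Claim_equal_format_queries_by_page := by
  intro queries _
  simp only [Spec_format_queries_by_page, format_queries_by_page, format_queries_by_page_alt]
  -- rewrite A's loop body to dict.modify
  rw [PySem.List.foldl_congr_mem _ _
        (fun d q => d.modify (pvPage q) [] (· ++ [q])) _
        (fun acc x _ => pv_stepA acc x)]
  have hkeys : (queries.foldl (fun d q => d.modify (pvPage q) [] (· ++ [q]))
      PySem.Dict.empty).keys = PySem.Set.ofList (queries.map pvPage) := by
    have := PySem.Dict.keys_foldl_modify_key queries pvPage
      ([] : List (List (String × Int))) (fun _ q v => v ++ [q]) PySem.Dict.empty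
    simpa [PySem.Set.update_nil_left] using this
  have hnodup : (queries.foldl (fun d q => d.modify (pvPage q) [] (· ++ [q]))
      PySem.Dict.empty).keys.Nodup := by
    rw [hkeys]; exact PySem.Set.nodup_ofList _
  have hgetD : ∀ c, (queries.foldl (fun d q => d.modify (pvPage q) [] (· ++ [q]))
      PySem.Dict.empty).getD c [] = queries.filter (fun q => pvPage q == c) := by
    intro c
    have h1 := PySem.Dict.getD_foldl_modify_append
      (queries.map (fun q => (pvPage q, q))) PySem.Dict.empty c
    rw [List.foldl_map] at h1
    simpa [List.filter_map, Function.comp_def, List.map_map] using h1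
  -- items of the dict
  rw [PySem.Dict.items_eq_map_keys _ hnodup ([] : List (List (String × Int)))]
  rw [hkeys]
  -- the dict items list, in key order: apply the sorted characterisation
  have hperm : ((PySem.List.sorted (PySem.Set.ofList (queries.map pvPage)) (fun k => k)
        false).map (fun k => (k, queries.filter (fun q => pvPage q == k)))).Perm
      ((PySem.Set.ofList (queries.map pvPage)).map
        (fun k => (k, (queries.foldl (fun d q => d.modify (pvPage q) [] (· ++ [q]))
          PySem.Dict.empty).getD k []))) := by
    have : (PySem.Set.ofList (queries.map pvPage)).map
        (fun k => (k, (queries.foldl (fun d q => d.modify (pvPage q) [] (· ++ [q]))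
          PySem.Dict.empty).getD k [])) =
        (PySem.Set.ofList (queries.map pvPage)).map
        (fun k => (k, queries.filter (fun q => pvPage q == k))) := by
      exact List.map_congr_left (fun k _ => by rw [hgetD k])
    rw [this]
    exact (PySem.List.sorted_perm _ _ _).map _
  have hpw : (((PySem.List.sorted (PySem.Set.ofList (queries.map pvPage)) (fun k => k)
        false).map (fun k => (k, queries.filter (fun q => pvPage q == k))))).Pairwise
      (fun a b => a.1 < b.1) := by
    exact List.Pairwise.map _ (by intro a b h; simpa using h)
      (PySem.List.sorted_ofList_pairwise_lt (queries.map pvPage))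
  exact PySem.List.sorted_eq_of_perm_of_pairwise_lt _ _ _ hperm hpw
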